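-- pv_equiv track=rewrite | github.com/haohao022/jerryscript | tools/unicode_case_conversion.py | extract_conversions
-- ===== SOURCE A (Python) =====
-- import itertools
--
-- def extract_conversions(letter_case):
--     """
--     Extract conversions. It provide the full (or remained) case mappings from the table.
--     The counter table contains the information of how much one-to-one, one-to-two or one-to-three mappings
--     exists successively in the conversion table.
--
--     :return: A table with conversions, and a table with counters.
--     """
--
--     unicodes = [[], [], []]
--     unicode_lengths = [0, 0, 0]
--
--     # 1 to 1 byte
--     for letter_id in sorted(letter_case.keys()):
--         mapped_value = letter_case[letter_id]
--
--         if len(mapped_value) != 1: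
--             continue
--
--         unicodes[0].extend([letter_id, ord(mapped_value)])
--         del letter_case[letter_id]
--
--     # 1 to 2 bytes
--     for letter_id in sorted(letter_case.keys()):
--         mapped_value = letter_case[letter_id]
--
--         if len(mapped_value) != 2:
--             continue
--
--         unicodes[1].extend([letter_id, ord(mapped_value[0]), ord(mapped_value[1])])
--         del letter_case[letter_id]
--
--     # 1 to 3 bytes
--     for letter_id in sorted(letter_case.keys()):
--         mapped_value = letter_case[letter_id]
--
--         if len(mapped_value) != 3:
--             continue
--
--         unicodes[2].extend([letter_id, ord(mapped_value[0]), ord(mapped_value[1]), ord(mapped_value[2])])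
--         del letter_case[letter_id]
--
--     unicode_lengths = [int(len(unicodes[0]) / 2), int(len(unicodes[1]) / 3), int(len(unicodes[2]) / 4)]
--
--     return list(itertools.chain.from_iterable(unicodes)), unicode_lengths
-- ===== SOURCE B (Python) =====
-- def extract_conversions(letter_case):
--     """Single sorted pass grouping keys into three buckets by mapped length."""
--     buckets = ([], [], [])
--     for letter_id in sorted(letter_case.keys()):
--         mapped_value = letter_case[letter_id]
--         n = len(mapped_value)
--         if 1 <= n <= 3:
--             buckets[n - 1].extend([letter_id, *map(ord, mapped_value)])
--             del letter_case[letter_id]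
--     lengths = [len(buckets[k]) // (k + 2) for k in range(3)]
--     return [x for bucket in buckets for x in bucket], lengths
-- ===== Notes on version B (the rewrite author's own statement) =====
-- stated objective: simpler
-- what changed: One pass over the once-sorted keys groups mappings into three buckets by mapped length (deleting those keys, as A does), replacing A's three separate sort-then-scan-then-delete passes.
import Mathlib
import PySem

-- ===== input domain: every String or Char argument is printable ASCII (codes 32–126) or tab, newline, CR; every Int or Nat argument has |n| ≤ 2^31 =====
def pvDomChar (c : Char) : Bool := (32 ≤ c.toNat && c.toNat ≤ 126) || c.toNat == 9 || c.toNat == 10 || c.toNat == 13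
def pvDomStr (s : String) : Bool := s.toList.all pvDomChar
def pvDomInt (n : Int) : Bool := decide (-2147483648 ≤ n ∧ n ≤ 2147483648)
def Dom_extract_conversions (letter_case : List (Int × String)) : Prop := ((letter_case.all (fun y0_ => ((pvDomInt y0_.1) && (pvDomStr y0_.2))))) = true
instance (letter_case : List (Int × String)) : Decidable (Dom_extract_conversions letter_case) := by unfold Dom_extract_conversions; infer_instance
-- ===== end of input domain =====

-- B replaces A's three sorted scan-and-delete passes by ONE sorted pass that buckets keys by
-- mapped length (objective: simpler). Equivalence proved is about the RETURN value; in Python both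
-- A and B also mutate letter_case identically (deleting keys whose mapped value has length 1, 2 or 3).


def pyOrds (s : String) : List Int := s.toList.map (fun c => (c.toNat : Int))

-- ===== PORT A =====
-- three passes over sorted(letter_case.keys()); each pass keeps mapped values of one length,
-- extends its bucket with [letter_id, ord(v[0]), …] (under the guard len v = L those are exactly
-- the L character codes, written uniformly as pyOrds v) and deletes the key from the dict
def extract_conversions (letter_case : List (Int × String)) : List Int × List Int :=
  let d0 : PySem.Dict Int String := PySem.Dict.ofList letter_case
  -- 1 to 1 byte
  let st1 := (PySem.List.sorted d0.keys (fun k => k) false).foldl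
    (fun (st : List Int × PySem.Dict Int String) k =>
      let mv := (st.2.get? k).getD ""          -- letter_case[letter_id]; the key is always present
      if PySem.Str.len mv ≠ 1 then st
      else (st.1 ++ k :: pyOrds mv, st.2.erase k)) (([] : List Int), d0)
  -- 1 to 2 bytes
  let st2 := (PySem.List.sorted st1.2.keys (fun k => k) false).foldl
    (fun (st : List Int × PySem.Dict Int String) k =>
      let mv := (st.2.get? k).getD ""
      if PySem.Str.len mv ≠ 2 then st
      else (st.1 ++ k :: pyOrds mv, st.2.erase k)) (([] : List Int), st1.2)
  -- 1 to 3 bytes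
  let st3 := (PySem.List.sorted st2.2.keys (fun k => k) false).foldl
    (fun (st : List Int × PySem.Dict Int String) k =>
      let mv := (st.2.get? k).getD ""
      if PySem.Str.len mv ≠ 3 then st
      else (st.1 ++ k :: pyOrds mv, st.2.erase k)) (([] : List Int), st2.2)
  -- int(len/2) etc.: the lengths are non-negative and exact, so Nat division is exact here
  (st1.1 ++ st2.1 ++ st3.1,
   [(st1.1.length / 2 : Nat), (st2.1.length / 3 : Nat), (st3.1.length / 4 : Nat)])

-- ===== PORT B =====
-- ONE pass over sorted(letter_case.keys()) with three buckets; a key whose mapped value has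
-- length 1, 2 or 3 goes to the matching bucket and is deleted, anything else is left untouched
def extract_conversions_alt (letter_case : List (Int × String)) : List Int × List Int :=
  let d : PySem.Dict Int String := PySem.Dict.ofList letter_case
  let st := (PySem.List.sorted d.keys (fun k => k) false).foldl
    (fun (st : (List Int × List Int × List Int) × PySem.Dict Int String) k =>
      let v := (st.2.get? k).getD ""           -- letter_case[letter_id]; the key is always present
      let n := PySem.Str.len v
      if n = 1 then ((st.1.1 ++ k :: pyOrds v, st.1.2.1, st.1.2.2), st.2.erase k)
      else if n = 2 then ((st.1.1, st.1.2.1 ++ k :: pyOrds v, st.1.2.2), st.2.erase k)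
      else if n = 3 then ((st.1.1, st.1.2.1, st.1.2.2 ++ k :: pyOrds v), st.2.erase k)
      else st) ((([] : List Int), ([] : List Int), ([] : List Int)), d)
  (st.1.1 ++ st.1.2.1 ++ st.1.2.2,
   [(st.1.1.length / 2 : Nat), (st.1.2.1.length / 3 : Nat), (st.1.2.2.length / 4 : Nat)])

-- ===== PRECONDITION & SPEC =====
def Spec_extract_conversions (letter_case : List (Int × String)) (out : List Int × List Int) : Prop := out = extract_conversions_alt letter_case
instance (letter_case : List (Int × String)) (out : List Int × List Int) : Decidable (Spec_extract_conversions letter_case out) := by unfold Spec_extract_conversions; infer_instance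

-- ===== CLAIM (what is proved, stated in full; the proofs are below) =====
def Claim_equal_extract_conversions : Prop := ∀ (letter_case : List (Int × String)), Dom_extract_conversions letter_case → Spec_extract_conversions letter_case (extract_conversions letter_case)

-- ===== LEMMAS AND PROOFS =====


-- ===== LEMMAS AND PROOFS =====

-- group extraction: contribution of each sorted item of mapped length L, in order
def selGroup (L : Int) (T : List (Int × String)) : List Int :=
  T.flatMap (fun p => if PySem.Str.len p.2 = L then p.1 :: pyOrds p.2 else [])

def sortedItems (d : PySem.Dict Int String) : List (Int × String) :=
  PySem.List.sorted d.items (fun p => p.1) false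

lemma get?_erase_of_ne (d : PySem.Dict Int String) (k j : Int) (h : j ≠ k) :
    (d.erase k).get? j = d.get? j := by
  simp only [PySem.Dict.erase, PySem.Dict.get?]
  induction d.items with
  | nil => rfl
  | cons p rest ih =>
    rcases eq_or_ne p.1 k with hpk | hpk
    · rw [List.filter_cons_of_neg (by simp [hpk]),
          List.find?_cons_of_neg (by simp [hpk, Ne.symm h])]
      exact ih
    · rw [List.filter_cons_of_pos (by simp [hpk])]
      rcases eq_or_ne p.1 j with hpj | hpj
      · rw [List.find?_cons_of_pos (by simp [hpj]), List.find?_cons_of_pos (by simp [hpj])]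
      · rw [List.find?_cons_of_neg (by simp [hpj]), List.find?_cons_of_neg (by simp [hpj])]
        exact ih

lemma keys_erase_sublist (d : PySem.Dict Int String) (k : Int) :
    (d.erase k).keys.Sublist d.keys := by
  simpa [PySem.Dict.erase, PySem.Dict.keys] using (List.filter_sublist (l := d.items)).map (·.1)

lemma nodup_keys_erase (d : PySem.Dict Int String) (k : Int) (h : d.keys.Nodup) :
    (d.erase k).keys.Nodup := h.sublist (keys_erase_sublist d k)

lemma sortedItems_perm (d : PySem.Dict Int String) : (sortedItems d).Perm d.items :=
  PySem.List.sorted_perm d.items (fun p => p.1) false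

lemma nodup_map_fst_sortedItems (d : PySem.Dict Int String) (h : d.keys.Nodup) :
    ((sortedItems d).map (·.1)).Nodup := by
  have hperm : ((sortedItems d).map (fun p : Int × String => p.1)).Perm (d.items.map (fun p => p.1)) :=
    (sortedItems_perm d).map (fun p => p.1)
  exact hperm.nodup_iff.mpr (by simpa [PySem.Dict.keys] using h)

lemma sortedItems_pairwise_lt (d : PySem.Dict Int String) (h : d.keys.Nodup) :
    (sortedItems d).Pairwise (fun a b => a.1 < b.1) := by
  have hle : (sortedItems d).Pairwise (fun a b => a.1 ≤ b.1) :=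
    PySem.List.sorted_pairwise d.items (fun p => p.1)
  have hne : (sortedItems d).Pairwise (fun a b => a.1 ≠ b.1) :=
    List.pairwise_map.mp (nodup_map_fst_sortedItems d h)
  exact (hle.and hne).imp (fun hab => lt_of_le_of_ne hab.1 hab.2)

lemma sorted_keys_eq_map_fst (d : PySem.Dict Int String) (h : d.keys.Nodup) :
    PySem.List.sorted d.keys (fun k => k) false = (sortedItems d).map (·.1) := by
  apply PySem.List.sorted_eq_of_perm_of_pairwise_lt
  · exact (sortedItems_perm d).map (·.1)
  · exact List.pairwise_map.mpr (sortedItems_pairwise_lt d h)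

lemma get?_of_mem_sortedItems (d : PySem.Dict Int String) (h : d.keys.Nodup)
    {p : Int × String} (hp : p ∈ sortedItems d) : d.get? p.1 = some p.2 :=
  PySem.Dict.get?_of_mem_items d (by
    have : p ∈ d.items := (PySem.List.mem_sorted _ _ _ _).mp hp
    simpa using this) h

lemma sortedItems_filter (d d' : PySem.Dict Int String) (h : d.keys.Nodup)
    (g : Int × String → Bool) (hItems : d'.items = d.items.filter g) :
    sortedItems d' = (sortedItems d).filter g := by
  unfold sortedItems
  rw [hItems]
  apply PySem.List.sorted_eq_of_perm_of_pairwise_lt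
  · exact (sortedItems_perm d).filter g
  · exact (sortedItems_pairwise_lt d h).filter g

lemma nodup_keys_of_items_filter (d d' : PySem.Dict Int String) (h : d.keys.Nodup)
    (g : Int × String → Bool) (hItems : d'.items = d.items.filter g) :
    d'.keys.Nodup := by
  have : d'.keys.Sublist d.keys := by
    simpa [PySem.Dict.keys, hItems] using (List.filter_sublist (l := d.items)).map (·.1)
  exact h.sublist this

lemma selGroup_filter (L : Int) (g : Int × String → Bool) (T : List (Int × String))
    (h : ∀ p ∈ T, PySem.Str.len p.2 = L → g p = true) :
    selGroup L (T.filter g) = selGroup L T := by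
  induction T with
  | nil => rfl
  | cons p rest ih =>
    have ih' := ih (fun q hq => h q (List.mem_cons_of_mem p hq))
    simp only [selGroup] at ih' ⊢
    by_cases hg : g p = true
    · rw [List.filter_cons_of_pos hg, List.flatMap_cons, List.flatMap_cons, ih']
    · have hL : ¬ PySem.Str.len p.2 = L := fun hl => hg (h p List.mem_cons_self hl)
      rw [List.filter_cons_of_neg hg, List.flatMap_cons, if_neg hL, List.nil_append, ih']

lemma foldA (L : Int) (T : List (Int × String)) : ∀ (d : PySem.Dict Int String) (b : List Int),
    (T.map (·.1)).Nodup → d.keys.Nodup → (∀ p ∈ T, d.get? p.1 = some p.2) →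
    (T.map (·.1)).foldl
      (fun (st : List Int × PySem.Dict Int String) k =>
        let mv := (st.2.get? k).getD ""
        if PySem.Str.len mv ≠ L then st
        else (st.1 ++ k :: pyOrds mv, st.2.erase k)) (b, d)
    = (b ++ selGroup L T,
       PySem.Dict.mk (d.items.filter
         (fun q => !(decide (q.1 ∈ T.map (·.1)) && decide (PySem.Str.len q.2 = L))))) := by
  induction T with
  | nil =>
    intro d b _ _ _
    simp [selGroup]
  | cons p rest ih =>
    intro d b hT hd hget
    rw [List.map_cons] at hT
    have hp1 : p.1 ∉ rest.map (·.1) := (List.nodup_cons.mp hT).1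
    have hrestT : (rest.map (·.1)).Nodup := (List.nodup_cons.mp hT).2
    have hmv : (d.get? p.1).getD "" = p.2 := by
      rw [hget p List.mem_cons_self]; rfl
    simp only [List.map_cons, List.foldl_cons]
    rw [hmv]
    by_cases hL : PySem.Str.len p.2 = L
    · have hL2 : ((p.2.length : Int)) = L := by simpa [PySem.Str.len] using hL
      have hget' : ∀ q ∈ rest, (d.erase p.1).get? q.1 = some q.2 := by
        intro q hq
        rw [get?_erase_of_ne d p.1 q.1
          (fun hc => hp1 (hc ▸ List.mem_map_of_mem hq))]
        exact hget q (List.mem_cons_of_mem p hq)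
      rw [if_neg (not_not_intro hL),
        ih (d.erase p.1) (b ++ p.1 :: pyOrds p.2) hrestT (nodup_keys_erase d p.1 hd) hget']
      apply Prod.ext
      · simp [selGroup, hL2, List.append_assoc]
      · show PySem.Dict.mk _ = PySem.Dict.mk _
        congr 1
        show List.filter _ ((d.erase p.1).items) = _
        have herase : (d.erase p.1).items = d.items.filter (fun q => !(q.1 == p.1)) := rfl
        rw [herase, List.filter_filter]
        apply List.filter_congr
        intro q hq
        by_cases hq1 : q.1 = p.1
        · have : d.get? q.1 = some q.2 := PySem.Dict.get?_of_mem_items d (by simpa using hq) hd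
          have hq2 : q.2 = p.2 := by
            rw [hq1, hget p List.mem_cons_self] at this
            exact (Option.some_inj.mp this).symm
          simp [hq1, hq2, hL2, List.mem_cons]
        · by_cases hm : q.1 ∈ rest.map (·.1) <;>
            by_cases hlen : ((q.2.length : Int)) = L <;>
            simp [hq1, hm, hlen, List.mem_cons]
    · have hL2 : ¬ ((p.2.length : Int)) = L := by simpa [PySem.Str.len] using hL
      rw [if_pos hL, ih d b hrestT hd (fun q hq => hget q (List.mem_cons_of_mem p hq))]
      apply Prod.ext
      · simp [selGroup, hL2]
      · show PySem.Dict.mk _ = PySem.Dict.mk _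
        congr 1
        apply List.filter_congr
        intro q hq
        by_cases hq1 : q.1 = p.1
        · have : d.get? q.1 = some q.2 := PySem.Dict.get?_of_mem_items d (by simpa using hq) hd
          have hq2 : q.2 = p.2 := by
            rw [hq1, hget p List.mem_cons_self] at this
            exact (Option.some_inj.mp this).symm
          simp [hq2, hL2]
        · by_cases hm : q.1 ∈ rest.map (·.1) <;>
            by_cases hlen : ((q.2.length : Int)) = L <;>
            simp [hq1, hm, hlen, List.mem_cons]

lemma foldB (T : List (Int × String)) : ∀ (d : PySem.Dict Int String)
    (acc : List Int × List Int × List Int),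
    (T.map (·.1)).Nodup → (∀ p ∈ T, d.get? p.1 = some p.2) →
    ((T.map (·.1)).foldl
      (fun (st : (List Int × List Int × List Int) × PySem.Dict Int String) k =>
        let v := (st.2.get? k).getD ""
        let n := PySem.Str.len v
        if n = 1 then ((st.1.1 ++ k :: pyOrds v, st.1.2.1, st.1.2.2), st.2.erase k)
        else if n = 2 then ((st.1.1, st.1.2.1 ++ k :: pyOrds v, st.1.2.2), st.2.erase k)
        else if n = 3 then ((st.1.1, st.1.2.1, st.1.2.2 ++ k :: pyOrds v), st.2.erase k)
        else st) (acc, d)).1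
    = (acc.1 ++ selGroup 1 T, acc.2.1 ++ selGroup 2 T, acc.2.2 ++ selGroup 3 T) := by
  induction T with
  | nil =>
    intro d acc _ _
    simp [selGroup]
  | cons p rest ih =>
    intro d acc hT hget
    rw [List.map_cons] at hT
    have hp1 : p.1 ∉ rest.map (·.1) := (List.nodup_cons.mp hT).1
    have hrestT : (rest.map (·.1)).Nodup := (List.nodup_cons.mp hT).2
    have hmv : (d.get? p.1).getD "" = p.2 := by
      rw [hget p List.mem_cons_self]; rfl
    have hget' : ∀ q ∈ rest, (d.erase p.1).get? q.1 = some q.2 := by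
      intro q hq
      rw [get?_erase_of_ne d p.1 q.1 (fun hc => hp1 (hc ▸ List.mem_map_of_mem hq))]
      exact hget q (List.mem_cons_of_mem p hq)
    have hgetRest : ∀ q ∈ rest, d.get? q.1 = some q.2 :=
      fun q hq => hget q (List.mem_cons_of_mem p hq)
    simp only [List.map_cons, List.foldl_cons]
    rw [hmv]
    by_cases h1 : PySem.Str.len p.2 = 1
    · have e1 : p.2.length = 1 := by
        have := h1; simp [PySem.Str.len] at this; exact_mod_cast this
      rw [if_pos h1, ih (d.erase p.1) _ hrestT hget']
      simp [selGroup, e1, List.append_assoc]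
    · rw [if_neg h1]
      by_cases h2 : PySem.Str.len p.2 = 2
      · have e2 : p.2.length = 2 := by
          have := h2; simp [PySem.Str.len] at this; exact_mod_cast this
        rw [if_pos h2, ih (d.erase p.1) _ hrestT hget']
        simp [selGroup, e2, List.append_assoc]
      · rw [if_neg h2]
        by_cases h3 : PySem.Str.len p.2 = 3
        · have e3 : p.2.length = 3 := by
            have := h3; simp [PySem.Str.len] at this; exact_mod_cast this
          rw [if_pos h3, ih (d.erase p.1) _ hrestT hget']
          simp [selGroup, e3, List.append_assoc]
        · rw [if_neg h3, ih d acc hrestT hgetRest]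
          have e1 : ¬ p.2.length = 1 := by
            intro hc; exact h1 (by simp [PySem.Str.len, hc])
          have e2 : ¬ p.2.length = 2 := by
            intro hc; exact h2 (by simp [PySem.Str.len, hc])
          have e3 : ¬ p.2.length = 3 := by
            intro hc; exact h3 (by simp [PySem.Str.len, hc])
          simp [selGroup, e1]; omega

-- pointwise always-true membership: every item key of d is in (sortedItems d).map fst
lemma mem_map_fst_sortedItems (d : PySem.Dict Int String) {q : Int × String}
    (hq : q ∈ d.items) : q.1 ∈ (sortedItems d).map (·.1) :=
  List.mem_map_of_mem ((PySem.List.mem_sorted _ _ _ _).mpr hq)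

theorem A_char (lc : List (Int × String)) :
    extract_conversions lc =
      (selGroup 1 (sortedItems (PySem.Dict.ofList lc)) ++
         selGroup 2 (sortedItems (PySem.Dict.ofList lc)) ++
         selGroup 3 (sortedItems (PySem.Dict.ofList lc)),
       [(((selGroup 1 (sortedItems (PySem.Dict.ofList lc))).length / 2 : Nat) : Int),
        (((selGroup 2 (sortedItems (PySem.Dict.ofList lc))).length / 3 : Nat) : Int),
        (((selGroup 3 (sortedItems (PySem.Dict.ofList lc))).length / 4 : Nat) : Int)]) := by
  have hnd0 : (PySem.Dict.ofList lc).keys.Nodup := PySem.Dict.nodup_keys_ofList lc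
  have hget : ∀ p ∈ sortedItems (PySem.Dict.ofList lc),
      (PySem.Dict.ofList lc).get? p.1 = some p.2 :=
    fun p hp => get?_of_mem_sortedItems _ hnd0 hp
  have hTn := nodup_map_fst_sortedItems _ hnd0
  unfold extract_conversions
  simp only [sorted_keys_eq_map_fst _ hnd0,
    foldA 1 (sortedItems (PySem.Dict.ofList lc)) (PySem.Dict.ofList lc) [] hTn hnd0 hget]
  have hItems1 : List.filter (fun q => !(decide (q.1 ∈ List.map (fun x => x.1) (sortedItems (PySem.Dict.ofList lc))) && decide (PySem.Str.len q.2 = 1))) (PySem.Dict.ofList lc).items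
      = List.filter (fun q => !decide (PySem.Str.len q.2 = 1)) (PySem.Dict.ofList lc).items :=
    List.filter_congr (fun q hq => by simp [mem_map_fst_sortedItems _ hq])
  rw [hItems1]
  set d1 : PySem.Dict Int String := PySem.Dict.mk (List.filter (fun q => !decide (PySem.Str.len q.2 = 1)) (PySem.Dict.ofList lc).items) with hd1
  have hI1 : d1.items = (PySem.Dict.ofList lc).items.filter (fun q => !decide (PySem.Str.len q.2 = 1)) := rfl
  have hnd1 : d1.keys.Nodup := nodup_keys_of_items_filter _ d1 hnd0 _ hI1
  have hT2 : sortedItems d1 = (sortedItems (PySem.Dict.ofList lc)).filter (fun q => !decide (PySem.Str.len q.2 = 1)) :=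
    sortedItems_filter _ d1 hnd0 _ hI1
  have hget1 : ∀ p ∈ sortedItems d1, d1.get? p.1 = some p.2 := fun p hp => get?_of_mem_sortedItems _ hnd1 hp
  have hTn1 : ((sortedItems d1).map (·.1)).Nodup := nodup_map_fst_sortedItems _ hnd1
  rw [sorted_keys_eq_map_fst d1 hnd1]
  simp only [foldA 2 (sortedItems d1) d1 [] hTn1 hnd1 hget1]
  have hItems2 : List.filter (fun q => !(decide (q.1 ∈ List.map (fun x => x.1) (sortedItems d1)) && decide (PySem.Str.len q.2 = 2))) d1.items
      = List.filter (fun q => !decide (PySem.Str.len q.2 = 2)) d1.items :=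
    List.filter_congr (fun q hq => by simp [mem_map_fst_sortedItems _ hq])
  rw [hItems2]
  set d2 : PySem.Dict Int String := PySem.Dict.mk (List.filter (fun q => !decide (PySem.Str.len q.2 = 2)) d1.items) with hd2
  have hI2 : d2.items = d1.items.filter (fun q => !decide (PySem.Str.len q.2 = 2)) := rfl
  have hnd2 : d2.keys.Nodup := nodup_keys_of_items_filter _ d2 hnd1 _ hI2
  have hT3 : sortedItems d2 = (sortedItems d1).filter (fun q => !decide (PySem.Str.len q.2 = 2)) :=
    sortedItems_filter _ d2 hnd1 _ hI2
  have hget2 : ∀ p ∈ sortedItems d2, d2.get? p.1 = some p.2 := fun p hp => get?_of_mem_sortedItems _ hnd2 hp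
  have hTn2 : ((sortedItems d2).map (·.1)).Nodup := nodup_map_fst_sortedItems _ hnd2
  rw [sorted_keys_eq_map_fst d2 hnd2]
  simp only [foldA 3 (sortedItems d2) d2 [] hTn2 hnd2 hget2]
  -- now replace the filtered sorted-item lists by filters of the original one and drop the filters
  have hs2 : selGroup 2 (sortedItems d1) = selGroup 2 (sortedItems (PySem.Dict.ofList lc)) := by
    rw [hT2]
    exact selGroup_filter 2 _ _ (fun p _ h => by simp [PySem.Str.len] at h ⊢; omega)
  have hs3 : selGroup 3 (sortedItems d2) = selGroup 3 (sortedItems (PySem.Dict.ofList lc)) := by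
    rw [hT3, hT2]
    rw [selGroup_filter 3 _ _ (fun p _ h => by simp [PySem.Str.len] at h ⊢; omega)]
    exact selGroup_filter 3 _ _ (fun p _ h => by simp [PySem.Str.len] at h ⊢; omega)
  rw [hs2, hs3]
  simp

theorem B_char (lc : List (Int × String)) :
    extract_conversions_alt lc =
      (selGroup 1 (sortedItems (PySem.Dict.ofList lc)) ++
         selGroup 2 (sortedItems (PySem.Dict.ofList lc)) ++
         selGroup 3 (sortedItems (PySem.Dict.ofList lc)),
       [(((selGroup 1 (sortedItems (PySem.Dict.ofList lc))).length / 2 : Nat) : Int),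
        (((selGroup 2 (sortedItems (PySem.Dict.ofList lc))).length / 3 : Nat) : Int),
        (((selGroup 3 (sortedItems (PySem.Dict.ofList lc))).length / 4 : Nat) : Int)]) := by
  have hnd0 : (PySem.Dict.ofList lc).keys.Nodup := PySem.Dict.nodup_keys_ofList lc
  have hget : ∀ p ∈ sortedItems (PySem.Dict.ofList lc),
      (PySem.Dict.ofList lc).get? p.1 = some p.2 :=
    fun p hp => get?_of_mem_sortedItems _ hnd0 hp
  have hTn := nodup_map_fst_sortedItems _ hnd0
  unfold extract_conversions_alt
  simp only [sorted_keys_eq_map_fst _ hnd0]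
  simp only [foldB (sortedItems (PySem.Dict.ofList lc)) (PySem.Dict.ofList lc)
    ([], [], []) hTn hget]
  simp

-- ===== VERDICT (by name: the statement is the Claim_ definition above) =====
theorem extract_conversions_spec : Claim_equal_extract_conversions := by
  intro lc _hdom
  unfold Spec_extract_conversions
  rw [A_char, B_char]
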